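-- pv_equiv track=rewrite | github.com/varunkuntal/Geeksforgeeks_Solutions | Easy/Generate_binary_strings_generate_&_replace(v1).py | generate_binary_string
-- ===== SOURCE A (Python) =====
-- def generate_binary_string(s):
--     if "?" not in s:
--         return [s]
--
--     S = s.split("?")
--     total_qms = s.count("?")
--     total_combs = 2 ** total_qms
--     combined = []
--     final = []
--
--     for j in range(total_qms):
--         binarycolumn = ""
--
--         for i in range(total_combs):
--
--
--             if i % (2 ** (j + 1)) < (2 ** (j + 1)) / 2:
--                 binarycolumn += "0"
--             else:
--                 binarycolumn += "1"
--
--         combined.append(binarycolumn)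
--
--     combined.reverse()
--
--     combined = list(zip(*combined))
--
--
--     indexes = [i for i, j in enumerate(s) if j == "?"]
--
--     for i in combined:
--         dup = list(map(str, s))
--         for j, k in enumerate(i):
--             dup[indexes[j]] = k
--         final_str = "".join(dup)
--         final_str = "".join(final_str.split())
--         final.append(final_str)
--
--     return final
-- ===== SOURCE B (Python) =====
-- def _expand(chars, positions):
--     if not positions:
--         joined = "".join(chars)
--         return ["".join(joined.split())]
--     p, rest = positions[0], positions[1:]
--     out = []
--     for bit in "01":
--         chars[p] = bit
--         out.extend(_expand(chars, rest))
--     return out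
--
--
-- def generate_binary_string(s):
--     if "?" not in s:
--         return [s]
--     positions = [i for i, ch in enumerate(s) if ch == "?"]
--     return _expand(list(s), positions)
-- ===== Notes on version B (the rewrite author's own statement) =====
-- stated objective: simpler
-- what changed: Replaces A's bit-column table construction (build one 0/1 column per '?', reverse, zip-transpose into tuples, then re-substitute by position) with a direct recursive backtracking that walks the list of '?' positions, filling the first one with '0' then '1'.
import Mathlib
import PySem

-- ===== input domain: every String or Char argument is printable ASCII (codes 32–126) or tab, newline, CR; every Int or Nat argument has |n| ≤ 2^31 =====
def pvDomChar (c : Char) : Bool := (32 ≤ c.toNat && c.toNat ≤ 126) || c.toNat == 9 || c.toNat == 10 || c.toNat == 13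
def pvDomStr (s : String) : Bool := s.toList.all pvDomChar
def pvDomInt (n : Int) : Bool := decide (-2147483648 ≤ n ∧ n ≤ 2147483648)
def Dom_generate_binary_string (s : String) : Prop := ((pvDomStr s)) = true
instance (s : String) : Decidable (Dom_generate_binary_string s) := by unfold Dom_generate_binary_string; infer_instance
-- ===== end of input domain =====

-- B replaces A's bit-column table (one 0/1 column per '?', reverse, zip-transpose,
-- positional re-substitution) by direct recursive backtracking over the '?' positions;
-- same return value, simpler structure.

-- ===== PORT A =====

-- zip(*rows) for a list of rows: Python zip stops at the shortest row
def pyZipStar (ls : List (List Char)) : List (List Char) :=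
  if h : ls ≠ [] ∧ ∀ l ∈ ls, l ≠ [] then
    ls.map (fun l => l.headD ' ') :: pyZipStar (ls.map (fun l => l.tail))
  else []
termination_by (ls.headD []).length
decreasing_by
  obtain ⟨h1, h2⟩ := h
  match ls, h1 with
  | l0 :: rest, _ =>
    have hl0 : l0 ≠ [] := h2 l0 (by simp)
    have hpos : 0 < l0.length := List.length_pos_iff.mpr hl0
    simp [List.length_tail]
    omega

def generate_binary_string (s : String) : List String :=
  if PySem.Str.isIn "?" s = false then [s]          -- if "?" not in s: return [s]
  else
    let _S := PySem.Str.split? s "?"                -- S = s.split("?")  (unused by A)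
    let total_qms := PySem.Str.count s "?"
    let total_combs := 2 ^ total_qms
    -- for j in range(total_qms): build binarycolumn over i in range(total_combs)
    -- (all Python ints here are nonnegative, so Nat ranges/arithmetic are exact;
    --  Python's float (2**(j+1))/2 is the exact integer 2^j, so Nat division is exact)
    let combined := (List.range total_qms).foldl
      (fun combined j =>
        let binarycolumn := (List.range total_combs).foldl
          (fun col i =>
            if i % 2 ^ (j + 1) < 2 ^ (j + 1) / 2 then col ++ ['0'] else col ++ ['1']) []
        combined ++ [binarycolumn]) []
    let combined := combined.reverse
    let combined := pyZipStar combined              -- combined = list(zip(*combined))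
    let indexes := ((PySem.List.enumerate s.toList).filter (fun p => p.2 == '?')).map (·.1)
    let final := combined.foldl
      (fun final i =>
        let dup := s.toList                         -- dup = list(map(str, s))
        let dup := (PySem.List.enumerate i).foldl
          (fun d p =>
            match PySem.List.pyGet? indexes p.1 with -- dup[indexes[j]] = k
            | some idx => d.set idx.toNat p.2        -- (index is in range and ≥ 0 here)
            | none => d) dup
        let final_str := PySem.Chars.join [] (PySem.Chars.split₀ dup)  -- "".join(final_str.split())
        final ++ [String.ofList final_str]) []
    final

-- ===== PORT B =====

def pvExpand (chars : List Char) (positions : List Int) : List String :=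
  match positions with
  | [] => [String.ofList (PySem.Chars.join [] (PySem.Chars.split₀ chars))]
  | p :: rest => ['0', '1'].flatMap (fun bit => pvExpand (chars.set p.toNat bit) rest)

def generate_binary_string_alt (s : String) : List String :=
  if PySem.Str.isIn "?" s = false then [s]
  else
    pvExpand s.toList (((PySem.List.enumerate s.toList).filter (fun p => p.2 == '?')).map (·.1))

-- ===== PRECONDITION & SPEC =====
def Spec_generate_binary_string (s : String) (out : List String) : Prop := out = generate_binary_string_alt s
instance (s : String) (out : List String) : Decidable (Spec_generate_binary_string s out) := by unfold Spec_generate_binary_string; infer_instance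

-- ===== CLAIM (what is proved, stated in full; the proofs are below) =====
def Claim_equal_generate_binary_string : Prop := ∀ (s : String), Dom_generate_binary_string s → Spec_generate_binary_string s (generate_binary_string s)

-- ===== LEMMAS AND PROOFS =====

-- MSB-first binary digits of i, q bits
def pvBits (q i : Nat) : List Char :=
  match q with
  | 0 => []
  | q + 1 => (if i / 2 ^ q % 2 = 0 then '0' else '1') :: pvBits q (i % 2 ^ q)

theorem pvBits_low (q i : Nat) (h : i < 2 ^ q) : pvBits (q + 1) i = '0' :: pvBits q i := by
  simp [pvBits, Nat.div_eq_of_lt h, Nat.mod_eq_of_lt h]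

theorem pvBits_high (q i : Nat) (h : i < 2 ^ q) :
    pvBits (q + 1) (2 ^ q + i) = '1' :: pvBits q i := by
  have hp : 0 < 2 ^ q := by positivity
  have h1 : (2 ^ q + i) / 2 ^ q = 1 := by
    rw [Nat.add_comm, Nat.add_div_right _ hp, Nat.div_eq_of_lt h]
  have h2 : (2 ^ q + i) % 2 ^ q = i := by
    rw [Nat.add_mod_left, Nat.mod_eq_of_lt h]
  simp [pvBits, h1, h2]

-- the per-(i,j) character A appends to column j equals the j-th binary digit of i
theorem pvBitchar (j i : Nat) :
    (if i % 2 ^ (j + 1) < 2 ^ (j + 1) / 2 then '0' else '1')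
      = (if i / 2 ^ j % 2 = 0 then '0' else '1') := by
  have h1 : i % 2 ^ j < 2 ^ j := Nat.mod_lt _ (by positivity)
  have e2 : 2 ^ (j + 1) / 2 = 2 ^ j := by rw [pow_succ]; omega
  rw [e2, pow_succ, Nat.mod_mul]
  rcases Nat.mod_two_eq_zero_or_one (i / 2 ^ j) with h2 | h2
  · rw [h2]; simp [h1]
  · rw [h2]; rw [if_neg (by omega), if_neg (by omega)]

-- A's reversed column-characters at row i are exactly pvBits
theorem pvRevCols (q i : Nat) (h : i < 2 ^ q) :
    (List.range q).reverse.map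
        (fun j => if i % 2 ^ (j + 1) < 2 ^ (j + 1) / 2 then '0' else '1')
      = pvBits q i := by
  induction q generalizing i with
  | zero => simp [pvBits]
  | succ q ih =>
    rw [List.range_succ]
    simp only [List.reverse_append, List.reverse_cons, List.reverse_nil, List.nil_append,
      List.cons_append, List.map_cons]
    rw [pvBitchar q i]
    have tail : (List.range q).reverse.map
        (fun j => if i % 2 ^ (j + 1) < 2 ^ (j + 1) / 2 then '0' else '1')
        = pvBits q (i % 2 ^ q) := by
      have : ∀ j ∈ (List.range q).reverse,
          (if i % 2 ^ (j + 1) < 2 ^ (j + 1) / 2 then '0' else '1')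
            = (if (i % 2 ^ q) % 2 ^ (j + 1) < 2 ^ (j + 1) / 2 then '0' else '1') := by
        intro j hj
        rw [List.mem_reverse, List.mem_range] at hj
        have : i % 2 ^ q % 2 ^ (j + 1) = i % 2 ^ (j + 1) :=
          Nat.mod_mod_of_dvd _ (pow_dvd_pow 2 (by omega))
        rw [this]
      rw [List.map_congr_left this]
      exact ih _ (Nat.mod_lt _ (by positivity))
    rw [tail]
    simp [pvBits]

-- pyZipStar of equal-length rows is the transpose
theorem pyZipStar_spec (N : Nat) (ls : List (List Char)) (hne : ls ≠ [])
    (hlen : ∀ l ∈ ls, l.length = N) :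
    pyZipStar ls = (List.range N).map (fun i => ls.map (fun l => l.getD i ' ')) := by
  induction N generalizing ls with
  | zero =>
    have : ¬ (ls ≠ [] ∧ ∀ l ∈ ls, l ≠ []) := by
      rintro ⟨h1, h2⟩
      match ls, h1 with
      | l0 :: rest, _ =>
        have := hlen l0 (by simp)
        have := h2 l0 (by simp)
        simp_all [List.length_eq_zero_iff]
    rw [pyZipStar, dif_neg this]
    simp
  | succ N ih =>
    have hcond : ls ≠ [] ∧ ∀ l ∈ ls, l ≠ [] := by
      refine ⟨hne, fun l hl => ?_⟩
      have := hlen l hl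
      intro hnil; simp [hnil] at this
    rw [pyZipStar, dif_pos hcond]
    have hlen' : ∀ l ∈ ls.map (fun l => l.tail), l.length = N := by
      intro l hl
      rw [List.mem_map] at hl
      obtain ⟨l0, hl0, rfl⟩ := hl
      have := hlen l0 hl0
      simp [List.length_tail, this]
    have hne' : ls.map (fun l => l.tail) ≠ [] := by simpa using hne
    rw [ih _ hne' hlen']
    rw [List.range_succ_eq_map]
    simp only [List.map_cons, List.map_map]
    congr 1
    · apply List.map_congr_left
      intro l hl
      have h0 : l ≠ [] := hcond.2 l hl
      match l, h0 with
      | c :: t, _ => simp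
    · apply List.map_congr_left
      intro i _
      simp only [Function.comp]
      apply List.map_congr_left
      intro l hl
      have h0 : l ≠ [] := hcond.2 l hl
      match l, h0 with
      | c :: t, _ => simp

-- A's substitution loop (enumerate + indexes lookup) equals the zip-fold substitution
theorem pvSubst (idxs : List Int) (tup : List Char) (k : Nat) (st : List Char) :
    (PySem.List.enumerate tup (k : Int)).foldl
        (fun d p =>
          match PySem.List.pyGet? idxs p.1 with
          | some idx => d.set idx.toNat p.2
          | none => d) st
      = ((idxs.drop k).zip tup).foldl (fun d p => d.set p.1.toNat p.2) st := by
  induction tup generalizing k st with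
  | nil => simp [PySem.List.enumerate_nil]
  | cons x xs ih =>
    rw [PySem.List.enumerate_cons]
    simp only [List.foldl_cons]
    have hcast : ((k : Int) + 1) = ((k + 1 : Nat) : Int) := by push_cast; ring
    rw [hcast]
    by_cases hk : k < idxs.length
    · rw [PySem.List.pyGet?_natCast, List.getElem?_eq_getElem hk]
      have hdrop : idxs.drop k = idxs[k] :: idxs.drop (k + 1) :=
        List.drop_eq_getElem_cons hk
      rw [hdrop]
      simp only [List.zip_cons_cons, List.foldl_cons]
      exact ih (k + 1) _
    · rw [PySem.List.pyGet?_natCast, List.getElem?_eq_none (by omega)]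
      have hdrop : idxs.drop k = [] := List.drop_eq_nil_of_le (by omega)
      have hdrop' : idxs.drop (k + 1) = [] := List.drop_eq_nil_of_le (by omega)
      rw [hdrop]
      rw [ih (k + 1) st, hdrop']
      simp

-- pvExpand is the map over all bit patterns, substituted by the zip-fold
theorem pvExpand_spec (ps : List Int) (cs : List Char) :
    pvExpand cs ps
      = (List.range (2 ^ ps.length)).map
          (fun i =>
            String.ofList (PySem.Chars.join [] (PySem.Chars.split₀
              ((ps.zip (pvBits ps.length i)).foldl (fun d p => d.set p.1.toNat p.2) cs)))) := by
  induction ps generalizing cs with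
  | nil => simp [pvExpand, pvBits]
  | cons p rest ih =>
    have hlen : (p :: rest).length = rest.length + 1 := rfl
    rw [pvExpand]
    simp only [List.flatMap_cons, List.flatMap_nil, List.append_nil]
    rw [ih, ih, hlen]
    have hsplit : (2 : Nat) ^ (rest.length + 1) = 2 ^ rest.length + 2 ^ rest.length := by ring
    rw [hsplit, List.range_add, List.map_append, List.map_map]
    congr 1
    · apply List.map_congr_left
      intro i hi
      rw [List.mem_range] at hi
      rw [pvBits_low _ _ hi]
      simp
    · apply List.map_congr_left
      intro i hi
      rw [List.mem_range] at hi
      simp only [Function.comp]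
      rw [pvBits_high _ _ hi]
      simp

-- Chars.count on a single-character needle is List.count
theorem pvCountGo (c : Char) (l : List Char) (fuel acc : Nat) (h : l.length ≤ fuel) :
    PySem.Chars.count.go [c] fuel l acc = acc + l.count c := by
  induction l generalizing fuel acc with
  | nil => cases fuel <;> simp [PySem.Chars.count.go]
  | cons x xs ih =>
    match fuel, h with
    | fuel + 1, h =>
      rw [PySem.Chars.count.go]
      have hx : xs.length ≤ fuel := by simpa using h
      by_cases hc : c = x
      · subst hc
        simp only [List.isPrefixOf, Bool.and_eq_true, beq_self_eq_true, true_and]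
        simp [ih fuel _ hx]
        omega
      · simp only [List.isPrefixOf, Bool.and_eq_true]
        rw [if_neg (by simp [hc])]
        simp [ih fuel _ hx, hc, eq_comm]

theorem pvCountSingleton (c : Char) (l : List Char) :
    PySem.Chars.count l [c] = l.count c := by
  rw [PySem.Chars.count]
  have : ([c] : List Char).isEmpty = false := rfl
  rw [this, if_neg (by simp)]
  rw [pvCountGo c l l.length 0 le_rfl]
  omega

-- the number of '?' positions equals the count of '?'
theorem pvIdxLen (c : Char) (t : List Char) (k : Int) :
    (((PySem.List.enumerate t k).filter (fun p => p.2 == c)).map (·.1)).length = t.count c := by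
  induction t generalizing k with
  | nil => simp [PySem.List.enumerate_nil]
  | cons x xs ih =>
    rw [PySem.List.enumerate_cons]
    simp only [List.filter_cons]
    by_cases hx : x = c <;> simp [hx, ih]

-- getD on a map over range
theorem pvGetDMapRange (N : Nat) (f : Nat → Char) (i : Nat) (hi : i < N) :
    ((List.range N).map f).getD i ' ' = f i := by
  rw [List.getD_eq_getElem?_getD, List.getElem?_map, List.getElem?_range hi]
  rfl

-- the whole else-branch of A, rewritten into B's shape
theorem pvMain (s : String) (hIn : ¬ PySem.Str.isIn "?" s = false) :
    generate_binary_string s = generate_binary_string_alt s := by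
  have hmem : '?' ∈ s.toList := by
    have h1 : PySem.Str.isIn "?" s = true := by
      cases h : PySem.Str.isIn "?" s with
      | false => exact absurd h hIn
      | true => rfl
    have h2 : ("?" : String).toList <:+: s.toList := (PySem.Str.isIn_iff_infix _ _).mp h1
    have h3 : ('?' : Char) ∈ ("?" : String).toList := by decide
    exact h2.subset h3
  have hq : PySem.Str.count s "?" = s.toList.count '?' := by
    rw [PySem.Str.count_eq]
    have h4 : ("?" : String).toList = ['?'] := by decide
    rw [h4, pvCountSingleton]
  have hlen : (((PySem.List.enumerate s.toList).filter (fun p => p.2 == '?')).map (·.1)).length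
      = s.toList.count '?' := pvIdxLen '?' s.toList 0
  have hqpos : 0 < s.toList.count '?' := List.count_pos_iff.mpr hmem
  -- abbreviations
  set t := s.toList with ht
  set idxs := ((PySem.List.enumerate t).filter (fun p => p.2 == '?')).map (·.1) with hidx
  set q := t.count '?' with hqdef
  set N := 2 ^ q with hN
  -- A's column for quantiper j, as a map
  have hcol : ∀ j : Nat,
      (List.range N).foldl
        (fun col i => if i % 2 ^ (j + 1) < 2 ^ (j + 1) / 2 then col ++ ['0'] else col ++ ['1']) []
      = (List.range N).map (fun i => if i % 2 ^ (j + 1) < 2 ^ (j + 1) / 2 then '0' else '1') := by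
    intro j
    have hb : (fun (col : List Char) (i : Nat) =>
          if i % 2 ^ (j + 1) < 2 ^ (j + 1) / 2 then col ++ ['0'] else col ++ ['1'])
        = fun col i => col ++ [if i % 2 ^ (j + 1) < 2 ^ (j + 1) / 2 then '0' else '1'] := by
      funext col i; split_ifs <;> rfl
    rw [hb, PySem.List.foldl_append_singleton_eq_map]
    simp
  -- unfold A (else branch), inline the lets (definitional)
  have hA : generate_binary_string s =
      ((pyZipStar (((List.range (PySem.Str.count s "?")).foldl
          (fun combined j => combined ++
            [(List.range (2 ^ PySem.Str.count s "?")).foldl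
              (fun col i =>
                if i % 2 ^ (j + 1) < 2 ^ (j + 1) / 2 then col ++ ['0'] else col ++ ['1']) []]) []).reverse)).foldl
        (fun final i => final ++
          [String.ofList (PySem.Chars.join [] (PySem.Chars.split₀
            ((PySem.List.enumerate i).foldl
              (fun d p =>
                match PySem.List.pyGet? idxs p.1 with
                | some idx => d.set idx.toNat p.2
                | none => d) t)))]) []) := by
    rw [generate_binary_string, if_neg hIn]
  rw [hA, hq]
  -- B side
  rw [generate_binary_string_alt, if_neg hIn, pvExpand_spec, hlen, ← hN]
  -- the final loop becomes a map
  rw [PySem.List.foldl_append_singleton_eq_map, List.nil_append]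
  -- the column loop becomes a map of columns
  rw [PySem.List.foldl_append_singleton_eq_map, List.nil_append]
  rw [List.map_congr_left (fun j _ => hcol j)]
  rw [← List.map_reverse]
  -- transpose
  have hzip := pyZipStar_spec N
    ((List.range q).reverse.map
      (fun j => (List.range N).map (fun i => if i % 2 ^ (j + 1) < 2 ^ (j + 1) / 2 then '0' else '1')))
    (by
      have : (List.range q).reverse ≠ [] := by
        simp [← List.length_eq_zero_iff]
        omega
      simpa using this)
    (by intro l hl; rw [List.mem_map] at hl; obtain ⟨j, _, rfl⟩ := hl; simp)
  rw [hzip]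
  rw [List.map_map]
  -- compare element by element
  apply List.map_congr_left
  intro i hi
  rw [List.mem_range] at hi
  simp only [Function.comp]
  -- the i-th tuple is pvBits q i
  have htup : ((List.range q).reverse.map
        (fun j => (List.range N).map
          (fun i => if i % 2 ^ (j + 1) < 2 ^ (j + 1) / 2 then '0' else '1'))).map
        (fun l => l.getD i ' ')
      = pvBits q i := by
    rw [List.map_map]
    have : ∀ j ∈ (List.range q).reverse,
        ((fun l : List Char => l.getD i ' ') ∘
          (fun j => (List.range N).map
            (fun i => if i % 2 ^ (j + 1) < 2 ^ (j + 1) / 2 then '0' else '1'))) j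
        = (if i % 2 ^ (j + 1) < 2 ^ (j + 1) / 2 then '0' else '1') := by
      intro j _
      exact pvGetDMapRange N _ i hi
    rw [List.map_congr_left this]
    exact pvRevCols q i hi
  rw [htup]
  -- the two substitution loops agree
  have hsub := pvSubst idxs (pvBits q i) 0 t
  simp only [Nat.cast_zero, List.drop_zero] at hsub
  rw [hsub]

-- ===== VERDICT (by name: the statement is the Claim_ definition above) =====
theorem generate_binary_string_spec : Claim_equal_generate_binary_string := by
  intro s _
  unfold Spec_generate_binary_string
  by_cases hIn : PySem.Str.isIn "?" s = false
  · rw [generate_binary_string, generate_binary_string_alt, if_pos hIn, if_pos hIn]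
  · exact pvMain s hIn
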